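-- pv_equiv track=rewrite | github.com/SlanyCukr/bugbounty-mcp-server | src/rest_api_server/utils/severity_mapping.py | _assess_vulnerability_severity
-- ===== SOURCE A (Python) =====
-- SEVERITY_LEVELS = {"critical": 5, "high": 4, "medium": 3, "low": 2, "info": 1}
--
-- VULNERABILITY_PATTERNS = {
--     # Critical patterns
--     "rce": "critical",
--     "remote code execution": "critical",
--     "command injection": "critical",
--     "code injection": "critical",
--     "deserialization": "critical",
--     "template injection": "critical",
--     # High severity patterns
--     "sql injection": "high",
--     "sqli": "high",
--     "xxe": "high",
--     "xml external entity": "high",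
--     "ldap injection": "high",
--     "xpath injection": "high",
--     "file upload": "high",
--     "unrestricted file upload": "critical",
--     "path traversal": "high",
--     "directory traversal": "high",
--     "lfi": "high",
--     "local file inclusion": "high",
--     "rfi": "high",
--     "remote file inclusion": "critical",
--     # Medium severity patterns
--     "xss": "medium",
--     "cross-site scripting": "medium",
--     "csrf": "medium",
--     "cross-site request forgery": "medium",
--     "clickjacking": "low",
--     "open redirect": "medium",
--     "ssrf": "high",
--     "server-side request forgery": "high",
--     "authentication bypass": "high",
--     "authorization bypass": "high",
--     "privilege escalation": "high",
--     "insecure direct object reference": "medium",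
--     "idor": "medium",
--     # Low/Info severity patterns
--     "information disclosure": "low",
--     "info disclosure": "low",
--     "version disclosure": "low",
--     "banner grabbing": "info",
--     "directory listing": "low",
--     "backup file": "medium",
--     "debug mode": "medium",
--     "test file": "low",
--     "missing security headers": "low",
--     "weak ssl": "medium",
--     "ssl certificate": "low",
-- }
--
-- def _assess_vulnerability_severity(
--     name: str, description: str, proof: str | None = None
-- ) -> str:
--     """Assess vulnerability severity based on name, description, and proof.
--
--     Args:
--         name: Vulnerability name
--         description: Vulnerability description
--         proof: Proof of concept or evidence
--
--     Returns:
--         Assessed severity level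
--     """
--     # Combine all text for pattern matching
--     parts = [part for part in (name, description, proof) if part]
--     combined_text = " ".join(parts).lower()
--
--     if not combined_text:
--         return "info"
--
--     # Check for RCE proof patterns
--     rce_patterns = ["id command", "whoami", "/etc/passwd", "cmd.exe", "system("]
--     if any(pattern in combined_text for pattern in rce_patterns):
--         return "critical"
--
--     # Check vulnerability patterns by severity
--     for pattern, severity in sorted(
--         VULNERABILITY_PATTERNS.items(),
--         key=lambda x: SEVERITY_LEVELS.get(x[1], 0),
--         reverse=True,
--     ):
--         if pattern in combined_text:
--             return severity
--
--     # Default based on proof existence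
--     if proof and len(proof.strip()) > 10:
--         return "medium"  # Has substantial proof
--     elif description and len(description.strip()) > 50:
--         return "low"  # Has description but no proof
--     else:
--         return "info"  # Minimal information
-- ===== SOURCE B (Python) =====
-- SEVERITY_LEVELS = {"critical": 5, "high": 4, "medium": 3, "low": 2, "info": 1}
--
-- VULNERABILITY_PATTERNS = {
--     "rce": "critical",
--     "remote code execution": "critical",
--     "command injection": "critical",
--     "code injection": "critical",
--     "deserialization": "critical",
--     "template injection": "critical",
--     "sql injection": "high",
--     "sqli": "high",
--     "xxe": "high",
--     "xml external entity": "high",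
--     "ldap injection": "high",
--     "xpath injection": "high",
--     "file upload": "high",
--     "unrestricted file upload": "critical",
--     "path traversal": "high",
--     "directory traversal": "high",
--     "lfi": "high",
--     "local file inclusion": "high",
--     "rfi": "high",
--     "remote file inclusion": "critical",
--     "xss": "medium",
--     "cross-site scripting": "medium",
--     "csrf": "medium",
--     "cross-site request forgery": "medium",
--     "clickjacking": "low",
--     "open redirect": "medium",
--     "ssrf": "high",
--     "server-side request forgery": "high",
--     "authentication bypass": "high",
--     "authorization bypass": "high",
--     "privilege escalation": "high",
--     "insecure direct object reference": "medium",
--     "idor": "medium",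
--     "information disclosure": "low",
--     "info disclosure": "low",
--     "version disclosure": "low",
--     "banner grabbing": "info",
--     "directory listing": "low",
--     "backup file": "medium",
--     "debug mode": "medium",
--     "test file": "low",
--     "missing security headers": "low",
--     "weak ssl": "medium",
--     "ssl certificate": "low",
-- }
--
-- _LEVEL_NAME = {level: name for name, level in SEVERITY_LEVELS.items()}
--
-- # RCE proof indicators, treated as ordinary maximal-severity (level 5) patterns.
-- _RCE_PROOF = ["id command", "whoami", "/etc/passwd", "cmd.exe", "system("]
--
--
-- def _assess_vulnerability_severity(
--     name: str, description: str, proof: str | None = None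
-- ) -> str:
--     """Assess vulnerability severity based on name, description, and proof."""
--     texts = [name, description, proof or ""]
--     combined = " ".join(t for t in texts if t).lower()
--
--     if not combined:
--         return "info"
--
--     # Collect the level of every matching pattern (RCE proof indicators count
--     # as level 5), then reduce by max.
--     hits = [5 for p in _RCE_PROOF if p in combined] + [
--         SEVERITY_LEVELS[s] for p, s in VULNERABILITY_PATTERNS.items() if p in combined
--     ]
--     if hits:
--         return _LEVEL_NAME[max(hits)]
--
--     pr = proof or ""
--     return (
--         "medium"
--         if pr and len(pr.strip()) > 10
--         else ("low" if description and len(description.strip()) > 50 else "info")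
--     )
-- ===== Notes on version B (the rewrite author's own statement) =====
-- stated objective: alternative
-- what changed: A early-returns 'critical' on a separate RCE-proof check and then sorts the pattern table by severity on every call, returning the first matching pattern; B has no early return and no sort: it collects the level of every matching pattern (RCE proof indicators included as level 5) into one list and reduces it by max, mapping the level back to its name.
import Mathlib
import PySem

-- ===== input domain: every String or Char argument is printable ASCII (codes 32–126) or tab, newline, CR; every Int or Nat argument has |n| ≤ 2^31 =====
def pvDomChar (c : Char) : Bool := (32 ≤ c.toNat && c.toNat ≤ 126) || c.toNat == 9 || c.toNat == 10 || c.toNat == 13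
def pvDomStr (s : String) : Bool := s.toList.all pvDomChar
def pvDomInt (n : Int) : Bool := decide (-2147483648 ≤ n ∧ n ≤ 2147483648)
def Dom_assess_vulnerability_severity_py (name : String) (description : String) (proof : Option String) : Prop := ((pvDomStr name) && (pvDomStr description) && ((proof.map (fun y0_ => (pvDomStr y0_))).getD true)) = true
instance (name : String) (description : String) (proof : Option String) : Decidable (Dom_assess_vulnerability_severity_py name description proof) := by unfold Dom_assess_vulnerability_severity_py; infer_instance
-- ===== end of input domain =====

-- B replaces A's separate RCE-proof early return plus per-call sort-and-first-hit
-- scan by one collect-all pass: it gathers the level of every matching pattern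
-- (RCE proof indicators counted as level 5) into a list and reduces it by max
-- (objective: alternative decomposition).

-- Module-level constants shared by both Python sources (same module).
def sevLevels : PySem.Dict String Int :=
  PySem.Dict.ofList [("critical", 5), ("high", 4), ("medium", 3), ("low", 2), ("info", 1)]

def vulnPatterns : List (String × String) :=
  [("rce", "critical"), ("remote code execution", "critical"), ("command injection", "critical"),
   ("code injection", "critical"), ("deserialization", "critical"), ("template injection", "critical"),
   ("sql injection", "high"), ("sqli", "high"), ("xxe", "high"), ("xml external entity", "high"),
   ("ldap injection", "high"), ("xpath injection", "high"), ("file upload", "high"),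
   ("unrestricted file upload", "critical"), ("path traversal", "high"), ("directory traversal", "high"),
   ("lfi", "high"), ("local file inclusion", "high"), ("rfi", "high"), ("remote file inclusion", "critical"),
   ("xss", "medium"), ("cross-site scripting", "medium"), ("csrf", "medium"),
   ("cross-site request forgery", "medium"), ("clickjacking", "low"), ("open redirect", "medium"),
   ("ssrf", "high"), ("server-side request forgery", "high"), ("authentication bypass", "high"),
   ("authorization bypass", "high"), ("privilege escalation", "high"),
   ("insecure direct object reference", "medium"), ("idor", "medium"), ("information disclosure", "low"),
   ("info disclosure", "low"), ("version disclosure", "low"), ("banner grabbing", "info"),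
   ("directory listing", "low"), ("backup file", "medium"), ("debug mode", "medium"), ("test file", "low"),
   ("missing security headers", "low"), ("weak ssl", "medium"), ("ssl certificate", "low")]

-- ===== PORT A =====
-- the for-loop with early return over the sorted pattern list
def pyA_scan : List (String × String) → String → Option String
  | [], _ => none
  | (pat, sev) :: rest, t => if PySem.Str.isIn pat t then some sev else pyA_scan rest t

def assess_vulnerability_severity_py (name : String) (description : String) (proof : Option String) : String :=
  let parts : List String := ([some name, some description, proof].filterMap id).filter (fun s => !(s == ""))
  let combined := PySem.Str.lower (PySem.Str.join " " parts)
  if combined == "" then "info"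
  else if ["id command", "whoami", "/etc/passwd", "cmd.exe", "system("].any
      (fun p => PySem.Str.isIn p combined) then "critical"
  else
    match pyA_scan (PySem.List.sorted vulnPatterns (fun x => PySem.Dict.getD sevLevels x.2 0) true) combined with
    | some sev => sev
    | none =>
      if (match proof with
          | some pr => !(pr == "") && decide (PySem.Str.len (PySem.Str.strip pr) > 10)
          | none => false) then "medium"
      else if !(description == "") && decide (PySem.Str.len (PySem.Str.strip description) > 50) then "low"
      else "info"

-- ===== PORT B =====
-- _LEVEL_NAME = {level: name for name, level in SEVERITY_LEVELS.items()}
def levelNames : PySem.Dict Int String :=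
  PySem.Dict.ofList ((PySem.Dict.items sevLevels).map (fun q => (q.2, q.1)))

-- _RCE_PROOF: RCE proof indicators, treated as ordinary level-5 patterns
def rceProofList : List String := ["id command", "whoami", "/etc/passwd", "cmd.exe", "system("]

-- hits = [5 for p in _RCE_PROOF if p in combined]
--      + [SEVERITY_LEVELS[s] for p, s in VULNERABILITY_PATTERNS.items() if p in combined]
-- (SEVERITY_LEVELS[s]: the key is always present, so getD 0 is exact here)
def hitsOf (t : String) : List Int :=
  (rceProofList.filter (fun p => PySem.Str.isIn p t)).map (fun _ => (5 : Int))
    ++ (vulnPatterns.filter (fun q => PySem.Str.isIn q.1 t)).map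
        (fun q => PySem.Dict.getD sevLevels q.2 0)

def assess_vulnerability_severity_py_alt (name : String) (description : String) (proof : Option String) : String :=
  let texts : List String := [name, description, proof.getD ""]
  let combined := PySem.Str.lower (PySem.Str.join " " (texts.filter (fun s => !(s == ""))))
  if combined == "" then "info"
  else
    let hits := hitsOf combined
    -- _LEVEL_NAME[max(hits)]: max(hits) ∈ {1,…,5} here, so getD "" is exact
    if !(hits == []) then
      PySem.Dict.getD levelNames ((PySem.List.max? hits (fun y => y)).getD 0) ""
    else
      let pr := proof.getD ""
      if !(pr == "") && decide (PySem.Str.len (PySem.Str.strip pr) > 10) then "medium"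
      else if !(description == "") && decide (PySem.Str.len (PySem.Str.strip description) > 50) then "low"
      else "info"

-- ===== PRECONDITION & SPEC =====
def Spec_assess_vulnerability_severity_py (name : String) (description : String) (proof : Option String) (out : String) : Prop := out = assess_vulnerability_severity_py_alt name description proof
instance (name : String) (description : String) (proof : Option String) (out : String) : Decidable (Spec_assess_vulnerability_severity_py name description proof out) := by unfold Spec_assess_vulnerability_severity_py; infer_instance

-- ===== CLAIM =====
def Claim_equal_assess_vulnerability_severity_py : Prop := ∀ (name : String) (description : String) (proof : Option String), Dom_assess_vulnerability_severity_py name description proof → Spec_assess_vulnerability_severity_py name description proof (assess_vulnerability_severity_py name description proof)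

-- ===== LEMMAS AND PROOFS =====

-- the two join inputs coincide: "" (from proof None) is filtered out anyway
lemma parts_eq (name description : String) (proof : Option String) :
    ([some name, some description, proof].filterMap id).filter (fun s => !(s == ""))
      = ([name, description, proof.getD ""].filter (fun s => !(s == ""))) := by
  cases proof with
  | none =>
    show ([name, description]).filter _ = ([name, description] ++ [""]).filter _
    rw [List.filter_append]
    simp [List.filter]
  | some pr => rfl

-- the severity blocks of sorted(VULNERABILITY_PATTERNS.items(), key=level, reverse=True)
def blk5 : List (String × String) :=
  [("rce", "critical"), ("remote code execution", "critical"), ("command injection", "critical"),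
   ("code injection", "critical"), ("deserialization", "critical"), ("template injection", "critical"),
   ("unrestricted file upload", "critical"), ("remote file inclusion", "critical")]
def blk4 : List (String × String) :=
  [("sql injection", "high"), ("sqli", "high"), ("xxe", "high"), ("xml external entity", "high"),
   ("ldap injection", "high"), ("xpath injection", "high"), ("file upload", "high"),
   ("path traversal", "high"), ("directory traversal", "high"), ("lfi", "high"),
   ("local file inclusion", "high"), ("rfi", "high"), ("ssrf", "high"),
   ("server-side request forgery", "high"), ("authentication bypass", "high"),
   ("authorization bypass", "high"), ("privilege escalation", "high")]
def blk3 : List (String × String) :=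
  [("xss", "medium"), ("cross-site scripting", "medium"), ("csrf", "medium"),
   ("cross-site request forgery", "medium"), ("open redirect", "medium"),
   ("insecure direct object reference", "medium"), ("idor", "medium"), ("backup file", "medium"),
   ("debug mode", "medium"), ("weak ssl", "medium")]
def blk2 : List (String × String) :=
  [("clickjacking", "low"), ("information disclosure", "low"), ("info disclosure", "low"),
   ("version disclosure", "low"), ("directory listing", "low"), ("test file", "low"),
   ("missing security headers", "low"), ("ssl certificate", "low")]
def blk1 : List (String × String) := [("banner grabbing", "info")]

lemma sorted_vuln_eq :
    PySem.List.sorted vulnPatterns (fun x => PySem.Dict.getD sevLevels x.2 0) true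
      = blk5 ++ (blk4 ++ (blk3 ++ (blk2 ++ blk1))) := by decide

def anyB (bl : List (String × String)) (t : String) : Bool := bl.any (fun q => PySem.Str.isIn q.1 t)

lemma pyA_scan_append_const (bl rest : List (String × String)) (t : String) (v : String)
    (h : ∀ q ∈ bl, q.2 = v) :
    pyA_scan (bl ++ rest) t = if anyB bl t then some v else pyA_scan rest t := by
  induction bl with
  | nil => simp [anyB]
  | cons q bl ih =>
    obtain ⟨p, s⟩ := q
    have hs : s = v := h (p, s) (by simp)
    have hrec := ih (fun q hq => h q (by simp [hq]))
    cases hc : PySem.Str.isIn p t with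
    | true => simp only [List.cons_append, pyA_scan, hc, if_true, anyB, List.any_cons,
        Bool.true_or, hs]
    | false => simp only [List.cons_append, pyA_scan, hc, if_false, Bool.false_eq_true, anyB,
        List.any_cons, Bool.false_or, hrec]; rfl

-- highest matched level of a pattern list (0 if no match)
def bestM (l : List (String × String)) (t : String) : Int :=
  l.foldr (fun q r => max (if PySem.Str.isIn q.1 t then PySem.Dict.getD sevLevels q.2 0 else 0) r) 0

lemma bestM_cons (p s : String) (l : List (String × String)) (t : String) :
    bestM ((p, s) :: l) t
      = max (if PySem.Str.isIn p t then PySem.Dict.getD sevLevels s 0 else 0) (bestM l t) := rfl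

lemma bestM_nonneg (l : List (String × String)) (t : String) : 0 ≤ bestM l t := by
  induction l with
  | nil => simp [bestM]
  | cons q l ih => obtain ⟨p, s⟩ := q; rw [bestM_cons]; omega

lemma bestM_perm {l l' : List (String × String)} (t : String) (h : l.Perm l') :
    bestM l t = bestM l' t := by
  induction h with
  | nil => rfl
  | cons x _ ih => obtain ⟨p, s⟩ := x; rw [bestM_cons, bestM_cons, ih]
  | swap x y l =>
    obtain ⟨p, s⟩ := x; obtain ⟨p', s'⟩ := y
    rw [bestM_cons, bestM_cons, bestM_cons, bestM_cons]; omega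
  | trans _ _ ih1 ih2 => rw [ih1, ih2]

lemma bestM_append (a b : List (String × String)) (t : String) :
    bestM (a ++ b) t = max (bestM a t) (bestM b t) := by
  induction a with
  | nil =>
    have := bestM_nonneg b t
    rw [List.nil_append, show bestM ([] : List (String × String)) t = 0 from rfl]; omega
  | cons q a ih =>
    obtain ⟨p, s⟩ := q
    rw [List.cons_append, bestM_cons, bestM_cons, ih]; omega

lemma bestM_const (bl : List (String × String)) (t : String) (v : String)
    (h : ∀ q ∈ bl, q.2 = v) (hv : 0 ≤ PySem.Dict.getD sevLevels v 0) :
    bestM bl t = if anyB bl t then PySem.Dict.getD sevLevels v 0 else 0 := by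
  induction bl with
  | nil => simp [bestM, anyB]
  | cons q bl ih =>
    obtain ⟨p, s⟩ := q
    have hs : s = v := h (p, s) (by simp)
    rw [bestM_cons, ih (fun q hq => h q (by simp [hq])), hs]
    cases hc : PySem.Str.isIn p t with
    | true =>
      rw [show anyB ((p, v) :: bl) t = true from by
            simp only [anyB, List.any_cons, hc, Bool.true_or],
          if_pos (rfl : true = true)]
      cases ha : anyB bl t
      · rw [if_neg (by simp)]; omega
      · rw [if_pos rfl]; omega
    | false =>
      rw [if_neg (by simp), show anyB ((p, v) :: bl) t = anyB bl t from by
            simp only [anyB, List.any_cons, hc, Bool.false_or]]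
      split_ifs <;> omega

lemma pyA_scan_blk1 (t : String) :
    pyA_scan blk1 t = if anyB blk1 t then some "info" else none := by
  have h := pyA_scan_append_const blk1 [] t "info" (by decide)
  rw [List.append_nil] at h
  exact h

-- bounds on the concrete severity table
lemma vuln_level_bounds : ∀ q ∈ vulnPatterns,
    1 ≤ PySem.Dict.getD sevLevels q.2 0 ∧ PySem.Dict.getD sevLevels q.2 0 ≤ 5 := by decide

lemma bestM_le_of (t : String) :
    ∀ l : List (String × String), (∀ q ∈ l, PySem.Dict.getD sevLevels q.2 0 ≤ 5) →
      bestM l t ≤ 5 := by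
  intro l
  induction l with
  | nil => intro _; simp [bestM]
  | cons q l ih =>
    intro h
    obtain ⟨p, s⟩ := q
    have h1 : PySem.Dict.getD sevLevels s 0 ≤ 5 := h (p, s) (List.mem_cons_self ..)
    have h2 := ih (fun q hq => h q (List.mem_cons_of_mem _ hq))
    rw [bestM_cons]
    split_ifs <;> omega

lemma bestM_le5 (t : String) : bestM vulnPatterns t ≤ 5 :=
  bestM_le_of t vulnPatterns (fun q hq => (vuln_level_bounds q hq).2)

-- foldl/foldr max bookkeeping
lemma foldr_max_shift (t : List Int) : ∀ x y : Int, t.foldr max (max x y) = max x (t.foldr max y) := by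
  induction t with
  | nil => intro x y; rfl
  | cons a t ih => intro x y; simp only [List.foldr_cons, ih]; omega

lemma foldl_max_eq_foldr (t : List Int) : ∀ x : Int, t.foldl max x = t.foldr max x := by
  induction t with
  | nil => intro x; rfl
  | cons a t ih =>
    intro x
    simp only [List.foldl_cons, List.foldr_cons, ih (max x a)]
    rw [show max x a = max a x from by omega, foldr_max_shift]

lemma maxD_cons (x : Int) (t : List Int) (hx : 0 ≤ x) :
    (PySem.List.max? (x :: t) (fun y => y)).getD 0 = (x :: t).foldr max 0 := by
  rw [PySem.List.max?_id_cons, Option.getD_some, foldl_max_eq_foldr, List.foldr_cons]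
  calc t.foldr max x = t.foldr max (max x 0) := by rw [show max x 0 = x from by omega]
    _ = max x (t.foldr max 0) := foldr_max_shift t x 0

-- the vulnerability-pattern half of hits folds to bestM
lemma vuln_hits_foldr (t : String) :
    ∀ l : List (String × String),
      ((l.filter (fun q => PySem.Str.isIn q.1 t)).map
          (fun q => PySem.Dict.getD sevLevels q.2 0)).foldr max 0 = bestM l t := by
  intro l
  induction l with
  | nil => rfl
  | cons q l ih =>
    obtain ⟨p, s⟩ := q
    have hnn := bestM_nonneg l t
    rw [bestM_cons]
    cases hc : PySem.Str.isIn p t with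
    | true =>
      simp only [List.filter_cons, hc, if_true, List.map_cons, List.foldr_cons, ih]
    | false =>
      simp only [List.filter_cons, hc, Bool.false_eq_true, if_false, ih]; omega

-- the RCE half of hits folds to max 5 z when any matches
lemma rce_hits_foldr (t : String) (z : Int) :
    ∀ l : List String,
      ((l.filter (fun p => PySem.Str.isIn p t)).map (fun _ => (5 : Int))).foldr max z
        = if l.any (fun p => PySem.Str.isIn p t) then max 5 z else z := by
  intro l
  induction l with
  | nil => rfl
  | cons p l ih =>
    cases hc : PySem.Str.isIn p t with
    | true =>
      have hc' : PySem.Chars.isIn p.toList t.toList = true := hc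
      have hf : (p :: l).filter (fun p => PySem.Str.isIn p t)
          = p :: l.filter (fun p => PySem.Str.isIn p t) := by
        simp [hc']
      rw [hf, List.map_cons, List.foldr_cons, ih,
          show ((p :: l).any (fun p => PySem.Str.isIn p t)) = true from by simp [hc'], if_pos rfl]
      split_ifs <;> omega
    | false =>
      simp only [List.filter_cons, hc, Bool.false_eq_true, if_false, ih, List.any_cons,
        Bool.false_or]

lemma hits_foldr (t : String) :
    (hitsOf t).foldr max 0
      = if rceProofList.any (fun p => PySem.Str.isIn p t) then max 5 (bestM vulnPatterns t)
        else bestM vulnPatterns t := by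
  rw [hitsOf, List.foldr_append, vuln_hits_foldr, rce_hits_foldr]

lemma hits_mem_nonneg (t : String) : ∀ y ∈ hitsOf t, 0 ≤ y := by
  intro y hy
  rw [hitsOf, List.mem_append] at hy
  rcases hy with hy | hy
  · obtain ⟨_, _, h⟩ := List.mem_map.mp hy; omega
  · obtain ⟨q, hq, h⟩ := List.mem_map.mp hy
    have := (vuln_level_bounds q (List.mem_of_mem_filter hq)).1
    omega

-- A's sorted first-hit scan equals bestM-then-name, for any text and default
lemma scan_agree (t dflt : String) :
    (match pyA_scan (PySem.List.sorted vulnPatterns (fun x => PySem.Dict.getD sevLevels x.2 0) true) t with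
     | some sev => sev
     | none => dflt)
    = (if bestM vulnPatterns t == 0 then dflt
       else PySem.Dict.getD levelNames (bestM vulnPatterns t) "") := by
  have hperm : bestM vulnPatterns t = bestM (blk5 ++ (blk4 ++ (blk3 ++ (blk2 ++ blk1)))) t :=
    bestM_perm t ((PySem.List.sorted_perm vulnPatterns
      (fun x => PySem.Dict.getD sevLevels x.2 0) true).symm.trans (by rw [sorted_vuln_eq]))
  rw [sorted_vuln_eq,
      pyA_scan_append_const blk5 _ t "critical" (by decide),
      pyA_scan_append_const blk4 _ t "high" (by decide),
      pyA_scan_append_const blk3 _ t "medium" (by decide),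
      pyA_scan_append_const blk2 _ t "low" (by decide),
      pyA_scan_blk1 t, hperm,
      bestM_append, bestM_append, bestM_append, bestM_append,
      bestM_const blk5 t "critical" (by decide) (by decide),
      bestM_const blk4 t "high" (by decide) (by decide),
      bestM_const blk3 t "medium" (by decide) (by decide),
      bestM_const blk2 t "low" (by decide) (by decide),
      bestM_const blk1 t "info" (by decide) (by decide)]
  cases h5 : anyB blk5 t <;> cases h4 : anyB blk4 t <;> cases h3 : anyB blk3 t <;>
    cases h2 : anyB blk2 t <;> cases h1 : anyB blk1 t <;> rfl

-- the whole post-combine body, for an arbitrary combined text t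
lemma body_agree (t : String) (description : String) (proof : Option String) :
    (if t == "" then "info"
     else if ["id command", "whoami", "/etc/passwd", "cmd.exe", "system("].any
         (fun p => PySem.Str.isIn p t) then "critical"
     else
       match pyA_scan (PySem.List.sorted vulnPatterns (fun x => PySem.Dict.getD sevLevels x.2 0) true) t with
       | some sev => sev
       | none =>
         if (match proof with
             | some pr => !(pr == "") && decide (PySem.Str.len (PySem.Str.strip pr) > 10)
             | none => false) then "medium"
         else if !(description == "") && decide (PySem.Str.len (PySem.Str.strip description) > 50) then "low"
         else "info")
    = (if t == "" then "info"
       else if !(hitsOf t == []) then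
         PySem.Dict.getD levelNames ((PySem.List.max? (hitsOf t) (fun y => y)).getD 0) ""
       else
         if !(proof.getD "" == "") && decide (PySem.Str.len (PySem.Str.strip (proof.getD "")) > 10) then "medium"
         else if !(description == "") && decide (PySem.Str.len (PySem.Str.strip description) > 50) then "low"
         else "info") := by
  by_cases h0 : (t == "") = true
  · rw [if_pos h0, if_pos h0]
  · rw [if_neg h0, if_neg h0]
    have hdflt :
        (if (match proof with
             | some pr => !(pr == "") && decide (PySem.Str.len (PySem.Str.strip pr) > 10)
             | none => false) then "medium"
         else if !(description == "") && decide (PySem.Str.len (PySem.Str.strip description) > 50) then "low"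
         else "info")
        = (if !(proof.getD "" == "") && decide (PySem.Str.len (PySem.Str.strip (proof.getD "")) > 10) then "medium"
           else if !(description == "") && decide (PySem.Str.len (PySem.Str.strip description) > 50) then "low"
           else "info") := by
      cases proof <;> rfl
    cases hrce : (rceProofList.any (fun p => PySem.Str.isIn p t)) with
    | true =>
      rw [show (["id command", "whoami", "/etc/passwd", "cmd.exe", "system("].any
          (fun p => PySem.Str.isIn p t)) = true from hrce, if_pos rfl]
      obtain ⟨p, hp, hm⟩ := List.any_eq_true.mp hrce
      have hne : hitsOf t ≠ [] := by
        have hpf : p ∈ rceProofList.filter (fun p => PySem.Str.isIn p t) :=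
          List.mem_filter.mpr ⟨hp, hm⟩
        have : (5 : Int) ∈ hitsOf t := by
          rw [hitsOf, List.mem_append]
          exact Or.inl (List.mem_map.mpr ⟨p, hpf, rfl⟩)
        exact List.ne_nil_of_mem this
      cases hh : hitsOf t with
      | nil => exact absurd hh hne
      | cons x tl =>
        have hx : 0 ≤ x := hits_mem_nonneg t x (by rw [hh]; exact List.mem_cons_self ..)
        have h2 : (x :: tl).foldr max 0 = max 5 (bestM vulnPatterns t) := by
          rw [← hh, hits_foldr, if_pos hrce]
        have h5 := bestM_le5 t
        have hmax : (PySem.List.max? (x :: tl) (fun y => y)).getD 0 = 5 := by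
          rw [maxD_cons x tl hx, h2]; omega
        rw [show (!((x :: tl : List Int) == [])) = true from rfl, if_pos rfl, hmax]
        decide
    | false =>
      rw [show (["id command", "whoami", "/etc/passwd", "cmd.exe", "system("].any
          (fun p => PySem.Str.isIn p t)) = false from hrce, if_neg (by simp)]
      have hfe : rceProofList.filter (fun p => PySem.Str.isIn p t) = [] := by
        rw [List.filter_eq_nil_iff]
        intro p hp
        have h := List.any_eq_false.mp hrce p hp
        exact h
      have hhv : hitsOf t = (vulnPatterns.filter (fun q => PySem.Str.isIn q.1 t)).map
          (fun q => PySem.Dict.getD sevLevels q.2 0) := by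
        rw [hitsOf, hfe]; rfl
      have hveq : (hitsOf t).foldr max 0 = bestM vulnPatterns t := by
        rw [hits_foldr, hrce]; simp
      rw [scan_agree t _, hdflt]
      cases hh : hitsOf t with
      | nil =>
        have hb : bestM vulnPatterns t = 0 := by rw [← hveq, hh]; rfl
        rw [hb]
        simp
      | cons x tl =>
        have hx : 0 ≤ x := hits_mem_nonneg t x (by rw [hh]; exact List.mem_cons_self ..)
        rw [hh] at hveq
        have hbpos : 1 ≤ bestM vulnPatterns t := by
          have hxm : x ∈ (vulnPatterns.filter (fun q => PySem.Str.isIn q.1 t)).map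
              (fun q => PySem.Dict.getD sevLevels q.2 0) := by
            rw [← hhv, hh]; exact List.mem_cons_self ..
          obtain ⟨q, hq, hqe⟩ := List.mem_map.mp hxm
          have h1 := (vuln_level_bounds q (List.mem_of_mem_filter hq)).1
          rw [← hveq, List.foldr_cons]
          omega
        have hmaxeq : (PySem.List.max? (x :: tl) (fun y => y)).getD 0 = bestM vulnPatterns t := by
          rw [maxD_cons x tl hx, hveq]
        have hc1 : (bestM vulnPatterns t == 0) = false := by
          rw [beq_eq_false_iff_ne]; omega
        rw [hmaxeq, hc1, show (!((x :: tl : List Int) == [])) = true from rfl, if_pos rfl,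
            if_neg (by simp)]

-- ===== VERDICT =====
theorem assess_vulnerability_severity_py_spec : Claim_equal_assess_vulnerability_severity_py := by
  intro name description proof _
  unfold Spec_assess_vulnerability_severity_py
  unfold assess_vulnerability_severity_py assess_vulnerability_severity_py_alt
  rw [parts_eq]
  exact body_agree _ description proof
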